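-- pv_equiv track=rewrite | github.com/prakratt/game_theory_evals | prisoners_dilemma/solver.py | build_history_table
-- ===== SOURCE A (Python) =====
-- def build_history_table(choices_a: list[str], choices_b: list[str],
--                         scores_a: list[int], scores_b: list[int]) -> str:
--     """Build a markdown table of round history with per-round and cumulative scores."""
--     lines = [
--         "| Round | You | Partner | Your Round Points | Partner Round Points | Your Cumulative | Partner Cumulative |",
--         "|-------|-----|---------|-------------------|----------------------|-----------------|--------------------|",
--     ]
--     cum_a = 0
--     cum_b = 0
--     for i in range(len(choices_a)):
--         cum_a += scores_a[i]
--         cum_b += scores_b[i]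
--         lines.append(
--             f"| {i+1} | {choices_a[i]} | {choices_b[i]} | {scores_a[i]} | {scores_b[i]} | {cum_a} | {cum_b} |"
--         )
--     return "\n".join(lines)
-- ===== SOURCE B (Python) =====
-- def build_history_table(choices_a: list[str], choices_b: list[str],
--                         scores_a: list[int], scores_b: list[int]) -> str:
--     """Build a markdown table of round history with per-round and cumulative scores."""
--     def prefix_sums(xs):
--         out, total = [], 0
--         for x in xs:
--             total += x
--             out.append(total)
--         return out
--
--     cum_a = prefix_sums(scores_a)
--     cum_b = prefix_sums(scores_b)
--     rows = [
--         "| Round | You | Partner | Your Round Points | Partner Round Points | Your Cumulative | Partner Cumulative |",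
--         "|-------|-----|---------|-------------------|----------------------|-----------------|--------------------|",
--     ] + [
--         f"| {i+1} | {choices_a[i]} | {choices_b[i]} | {scores_a[i]} | {scores_b[i]} | {cum_a[i]} | {cum_b[i]} |"
--         for i in range(len(choices_a))
--     ]
--     return "\n".join(rows)
-- ===== Notes on version B (the rewrite author's own statement) =====
-- stated objective: alternative
-- what changed: B precomputes the two cumulative score sequences as prefix-sum tables in a separate pass and then builds the rows by pure indexing (a comprehension), instead of A's single loop that interleaves two running accumulators with row emission.
import Mathlib
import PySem

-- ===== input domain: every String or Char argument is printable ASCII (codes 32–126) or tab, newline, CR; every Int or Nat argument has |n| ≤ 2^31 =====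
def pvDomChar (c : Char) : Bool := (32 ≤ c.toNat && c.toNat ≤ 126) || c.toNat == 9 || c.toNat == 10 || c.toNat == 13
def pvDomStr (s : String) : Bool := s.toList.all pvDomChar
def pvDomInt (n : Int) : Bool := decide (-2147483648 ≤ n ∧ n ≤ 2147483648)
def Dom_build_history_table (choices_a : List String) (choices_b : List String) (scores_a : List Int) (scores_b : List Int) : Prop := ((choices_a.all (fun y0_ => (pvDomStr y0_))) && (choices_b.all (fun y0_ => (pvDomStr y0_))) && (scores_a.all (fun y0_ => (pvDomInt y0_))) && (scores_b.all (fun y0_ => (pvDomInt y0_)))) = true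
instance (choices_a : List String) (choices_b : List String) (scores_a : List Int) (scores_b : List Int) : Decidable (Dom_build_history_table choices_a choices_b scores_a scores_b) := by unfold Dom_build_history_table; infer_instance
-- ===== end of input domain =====

-- ===== PORT A =====
-- B precomputes prefix-sum tables and builds rows by indexing; A keeps running accumulators. Alternative decomposition, same cost.
def build_history_table (choices_a : List String) (choices_b : List String) (scores_a : List Int) (scores_b : List Int) : String :=
  let lines : List String := [
    "| Round | You | Partner | Your Round Points | Partner Round Points | Your Cumulative | Partner Cumulative |",
    "|-------|-----|---------|-------------------|----------------------|-----------------|--------------------|"]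
  let st := (List.range choices_a.length).foldl
    (fun (st : Int × Int × List String) (i : Nat) =>
      let cumA := st.1 + PySem.List.pyGetD scores_a (i : Int) 0
      let cumB := st.2.1 + PySem.List.pyGetD scores_b (i : Int) 0
      (cumA, cumB, st.2.2 ++
        ["| " ++ PySem.Int.toStr ((i : Int) + 1) ++ " | " ++ PySem.List.pyGetD choices_a (i : Int) "" ++
         " | " ++ PySem.List.pyGetD choices_b (i : Int) "" ++ " | " ++
         PySem.Int.toStr (PySem.List.pyGetD scores_a (i : Int) 0) ++ " | " ++
         PySem.Int.toStr (PySem.List.pyGetD scores_b (i : Int) 0) ++ " | " ++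
         PySem.Int.toStr cumA ++ " | " ++ PySem.Int.toStr cumB ++ " |"]))
    ((0 : Int), (0 : Int), lines)
  PySem.Str.join "\n" st.2.2

-- ===== PORT B =====
-- helper: prefix_sums from Source B
def pvPrefixSums (xs : List Int) : List Int :=
  (xs.foldl (fun (st : Int × List Int) x => (st.1 + x, st.2 ++ [st.1 + x])) ((0 : Int), ([] : List Int))).2

def build_history_table_alt (choices_a : List String) (choices_b : List String) (scores_a : List Int) (scores_b : List Int) : String :=
  let cum_a := pvPrefixSums scores_a
  let cum_b := pvPrefixSums scores_b
  let rows : List String := [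
    "| Round | You | Partner | Your Round Points | Partner Round Points | Your Cumulative | Partner Cumulative |",
    "|-------|-----|---------|-------------------|----------------------|-----------------|--------------------|"] ++
    (List.range choices_a.length).map (fun (i : Nat) =>
      "| " ++ PySem.Int.toStr ((i : Int) + 1) ++ " | " ++ PySem.List.pyGetD choices_a (i : Int) "" ++
      " | " ++ PySem.List.pyGetD choices_b (i : Int) "" ++ " | " ++
      PySem.Int.toStr (PySem.List.pyGetD scores_a (i : Int) 0) ++ " | " ++
      PySem.Int.toStr (PySem.List.pyGetD scores_b (i : Int) 0) ++ " | " ++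
      PySem.Int.toStr (PySem.List.pyGetD cum_a (i : Int) 0) ++ " | " ++
      PySem.Int.toStr (PySem.List.pyGetD cum_b (i : Int) 0) ++ " |")
  PySem.Str.join "\n" rows

-- ===== PRECONDITION & SPEC =====
-- Pre_ excludes exactly the inputs on which A raises IndexError: any of the other three lists shorter than choices_a.
def Pre_build_history_table (choices_a : List String) (choices_b : List String) (scores_a : List Int) (scores_b : List Int) : Prop :=
  choices_a.length ≤ choices_b.length ∧ choices_a.length ≤ scores_a.length ∧ choices_a.length ≤ scores_b.length
instance (choices_a : List String) (choices_b : List String) (scores_a : List Int) (scores_b : List Int) : Decidable (Pre_build_history_table choices_a choices_b scores_a scores_b) := by unfold Pre_build_history_table; infer_instance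
def pvWitness_build_history_table : List String × List String × List Int × List Int :=
  (["C", "D"], ["D", "C"], [3, 0], [5, 1])

def Spec_build_history_table (choices_a : List String) (choices_b : List String) (scores_a : List Int) (scores_b : List Int) (out : String) : Prop := out = build_history_table_alt choices_a choices_b scores_a scores_b
instance (choices_a : List String) (choices_b : List String) (scores_a : List Int) (scores_b : List Int) (out : String) : Decidable (Spec_build_history_table choices_a choices_b scores_a scores_b out) := by unfold Spec_build_history_table; infer_instance

-- ===== CLAIM (what is proved, stated in full; the proofs are below) =====
def Claim_equal_build_history_table : Prop := ∀ (choices_a : List String) (choices_b : List String) (scores_a : List Int) (scores_b : List Int), Dom_build_history_table choices_a choices_b scores_a scores_b → Pre_build_history_table choices_a choices_b scores_a scores_b → Spec_build_history_table choices_a choices_b scores_a scores_b (build_history_table choices_a choices_b scores_a scores_b)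

-- ===== LEMMAS AND PROOFS =====

-- the prefix-sum fold, generalized over the starting accumulator pair
theorem pvPrefixSums_fold (xs : List Int) (t : Int) (acc : List Int) :
    xs.foldl (fun (st : Int × List Int) x => (st.1 + x, st.2 ++ [st.1 + x])) (t, acc)
      = (t + xs.sum, acc ++ (List.range xs.length).map (fun i => t + (xs.take (i + 1)).sum)) := by
  induction xs generalizing t acc with
  | nil => simp
  | cons x xs ih =>
      simp [ih, List.range_succ_eq_map, Function.comp_def, List.take_succ_cons, add_assoc]

theorem pvPrefixSums_eq (xs : List Int) :
    pvPrefixSums xs = (List.range xs.length).map (fun i => (xs.take (i + 1)).sum) := by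
  unfold pvPrefixSums
  rw [pvPrefixSums_fold]
  simp

theorem pvPrefixSums_get (xs : List Int) (i : Nat) (h : i < xs.length) :
    PySem.List.pyGetD (pvPrefixSums xs) (i : Int) 0 = (xs.take (i + 1)).sum := by
  rw [pvPrefixSums_eq, PySem.List.pyGetD_natCast, List.getD_eq_getElem?_getD]
  simp [h]

theorem take_succ_sum (xs : List Int) (i : Nat) (h : i < xs.length) :
    (xs.take (i + 1)).sum = (xs.take i).sum + PySem.List.pyGetD xs (i : Int) 0 := by
  rw [List.take_add_one, PySem.List.pyGetD_natCast, List.getD_eq_getElem?_getD]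
  simp [h]

-- loop invariant: A's fold state = (prefix sums, header ++ B's rows)
theorem pvMain (choices_a choices_b : List String) (scores_a scores_b : List Int)
    (hdr : List String) (n : Nat) (ha : n ≤ scores_a.length) (hb : n ≤ scores_b.length) :
    (List.range n).foldl
      (fun (st : Int × Int × List String) (i : Nat) =>
        let cumA := st.1 + PySem.List.pyGetD scores_a (i : Int) 0
        let cumB := st.2.1 + PySem.List.pyGetD scores_b (i : Int) 0
        (cumA, cumB, st.2.2 ++
          ["| " ++ PySem.Int.toStr ((i : Int) + 1) ++ " | " ++ PySem.List.pyGetD choices_a (i : Int) "" ++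
           " | " ++ PySem.List.pyGetD choices_b (i : Int) "" ++ " | " ++
           PySem.Int.toStr (PySem.List.pyGetD scores_a (i : Int) 0) ++ " | " ++
           PySem.Int.toStr (PySem.List.pyGetD scores_b (i : Int) 0) ++ " | " ++
           PySem.Int.toStr cumA ++ " | " ++ PySem.Int.toStr cumB ++ " |"]))
      ((0 : Int), (0 : Int), hdr)
    = ((scores_a.take n).sum, (scores_b.take n).sum,
       hdr ++ (List.range n).map (fun (i : Nat) =>
         "| " ++ PySem.Int.toStr ((i : Int) + 1) ++ " | " ++ PySem.List.pyGetD choices_a (i : Int) "" ++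
         " | " ++ PySem.List.pyGetD choices_b (i : Int) "" ++ " | " ++
         PySem.Int.toStr (PySem.List.pyGetD scores_a (i : Int) 0) ++ " | " ++
         PySem.Int.toStr (PySem.List.pyGetD scores_b (i : Int) 0) ++ " | " ++
         PySem.Int.toStr (PySem.List.pyGetD (pvPrefixSums scores_a) (i : Int) 0) ++ " | " ++
         PySem.Int.toStr (PySem.List.pyGetD (pvPrefixSums scores_b) (i : Int) 0) ++ " |")) := by
  induction n with
  | zero => simp
  | succ n ih =>
      have hn_a : n < scores_a.length := by omega
      have hn_b : n < scores_b.length := by omega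
      rw [List.range_succ, List.foldl_append, ih (by omega) (by omega), List.map_append,
        List.foldl_cons, List.foldl_nil]
      simp only [List.map_cons, List.map_nil, ← List.append_assoc]
      rw [pvPrefixSums_get scores_a n hn_a, pvPrefixSums_get scores_b n hn_b,
        take_succ_sum scores_a n hn_a, take_succ_sum scores_b n hn_b]

-- ===== VERDICT (by name: the statement is the Claim_ definition above) =====
theorem build_history_table_spec : Claim_equal_build_history_table := by
  intro choices_a choices_b scores_a scores_b _hDom hPre
  obtain ⟨_, ha, hb⟩ := hPre
  show build_history_table choices_a choices_b scores_a scores_b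
      = build_history_table_alt choices_a choices_b scores_a scores_b
  dsimp only [build_history_table, build_history_table_alt]
  rw [pvMain choices_a choices_b scores_a scores_b _ choices_a.length ha hb]
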